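-- pv_equiv track=rewrite | github.com/Astrum-AI/Zentra | cli/templates/ui/attributes.py | alt_attribute
-- ===== SOURCE A (Python) =====
-- def str_attr(name: str, value: str) -> str:
--     """A helper function for creating string attribute strings, such as `color="red"`."""
--     return f'{name}="{value}"'
--
-- def param_attr(name: str, value: int | str, backticks: bool = False) -> str:
--     """A helper function for creating parameter attribute strings, such as `size={48}`, `checked={false}`, or ```alt={`I have a {param} here`}```."""
--     if backticks:
--         return f"{name}={{`{value}`}}"
--
--     return f"{name}={{{value}}}"
--
-- def alt_attribute(alt: str, attr_name: str = "alt") -> str: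
--     """Returns a string for the `alt` attribute based on its given value."""
--     values = alt.split(" ")
--     param_str = False
--
--     new_alt = []
--     for word in values:
--         if word and word.startswith("$"):
--             word = "{" + word[1:] + "}"
--             param_str = True
--         new_alt.append(word)
--
--     if param_str:
--         return param_attr(attr_name, " ".join(new_alt), backticks=True)
--
--     return str_attr(attr_name, " ".join(new_alt))
-- ===== SOURCE B (Python) =====
-- def alt_attribute(alt: str, attr_name: str = "alt") -> str:
--     """Returns a string for the `alt` attribute based on its given value.
--
--     Single left-to-right character scan (a small state machine) instead of
--     split/loop/join: words are never materialised."""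
--     out = []
--     found = False
--     at_word_start = True
--     in_param = False
--     for ch in alt:
--         if ch == ' ':
--             if in_param:
--                 out.append('}')
--                 in_param = False
--             out.append(' ')
--             at_word_start = True
--         elif at_word_start and ch == '$':
--             out.append('{')
--             in_param = True
--             found = True
--             at_word_start = False
--         else:
--             out.append(ch)
--             at_word_start = False
--     if in_param:
--         out.append('}')
--     body = ''.join(out)
--     if found:
--         return f"{attr_name}={{`{body}`}}"
--     return f'{attr_name}="{body}"'
-- ===== Notes on version B (the rewrite author's own statement) =====
-- stated objective: alternative
-- what changed: Replaces split-on-space / per-word loop with flag / join by a single left-to-right character scan (a small state machine with at-word-start and open-brace flags) that never materialises the word list.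
import Mathlib
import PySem

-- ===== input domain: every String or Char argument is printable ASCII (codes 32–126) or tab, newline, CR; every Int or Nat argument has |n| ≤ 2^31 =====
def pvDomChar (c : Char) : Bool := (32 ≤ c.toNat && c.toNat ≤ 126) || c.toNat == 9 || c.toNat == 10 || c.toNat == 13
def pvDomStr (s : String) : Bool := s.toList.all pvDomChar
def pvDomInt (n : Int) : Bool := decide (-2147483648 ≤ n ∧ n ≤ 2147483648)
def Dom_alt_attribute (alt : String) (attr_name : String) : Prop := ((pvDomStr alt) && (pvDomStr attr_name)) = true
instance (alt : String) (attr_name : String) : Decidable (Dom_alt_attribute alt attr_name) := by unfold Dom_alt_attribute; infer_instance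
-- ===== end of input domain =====

-- B replaces A's split/loop/join over words by a single left-to-right character
-- scan (a small state machine); objective: alternative (same cost, different traversal).


-- ===== PORT A =====
-- helper str_attr: f'{name}="{value}"' (concatenation done on char lists; exact for f-strings)
def str_attr (name : String) (value : String) : String :=
  String.ofList (name.toList ++ "=\"".toList ++ value.toList ++ "\"".toList)

-- helper param_attr: f"{name}={{`{value}`}}" / f"{name}={{{value}}}"
def param_attr (name : String) (value : String) (backticks : Bool) : String :=
  if backticks then
    String.ofList (name.toList ++ "={`".toList ++ value.toList ++ "`}".toList)
  else
    String.ofList (name.toList ++ "={".toList ++ value.toList ++ "}".toList)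

def alt_attribute (alt : String) (attr_name : String) : String :=
  let values := PySem.Chars.splitOn alt.toList [' ']
  -- for word in values: if word and word.startswith("$"): wrap, set flag; append
  let st := values.foldl
    (fun (st : Bool × List (List Char)) word =>
      if (word ≠ []) && PySem.Chars.startswith word ['$'] then
        (true, st.2 ++ [['{'] ++ PySem.List.slice word (some 1) none ++ ['}']])
      else
        (st.1, st.2 ++ [word]))
    (false, [])
  if st.1 then
    param_attr attr_name (String.ofList (PySem.Chars.join [' '] st.2)) true
  else
    str_attr attr_name (String.ofList (PySem.Chars.join [' '] st.2))

-- ===== PORT B =====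
-- one character of B's state machine: state = (at_word_start, in_param, found, out)
def stepB (st : Bool × Bool × Bool × List Char) (ch : Char) : Bool × Bool × Bool × List Char :=
  let (atStart, inParam, found, out) := st
  if ch = ' ' then
    (true, false, found, (if inParam then out ++ ['}'] else out) ++ [' '])
  else if atStart && ch = '$' then
    (false, true, true, out ++ ['{'])
  else
    (false, inParam, found, out ++ [ch])

def alt_attribute_alt (alt : String) (attr_name : String) : String :=
  let st := alt.toList.foldl stepB (true, false, false, [])
  let body := if st.2.1 then st.2.2.2 ++ ['}'] else st.2.2.2
  if st.2.2.1 then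
    String.ofList (attr_name.toList ++ "={`".toList ++ body ++ "`}".toList)
  else
    String.ofList (attr_name.toList ++ "=\"".toList ++ body ++ "\"".toList)

-- ===== PRECONDITION & SPEC =====
def Spec_alt_attribute (alt : String) (attr_name : String) (out : String) : Prop := out = alt_attribute_alt alt attr_name
instance (alt : String) (attr_name : String) (out : String) : Decidable (Spec_alt_attribute alt attr_name out) := by unfold Spec_alt_attribute; infer_instance

-- ===== CLAIM (what is proved, stated in full; the proofs are below) =====
def Claim_equal_alt_attribute : Prop := ∀ (alt : String) (attr_name : String), Dom_alt_attribute alt attr_name → Spec_alt_attribute alt attr_name (alt_attribute alt attr_name)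

-- ===== LEMMAS AND PROOFS =====

-- reference splitter: Python's str.split(" ") as a structural recursion
def split1 : List Char → List (List Char)
  | [] => [[]]
  | c :: cs =>
    if c = ' ' then [] :: split1 cs
    else match split1 cs with
      | [] => [[c]]
      | h :: t => (c :: h) :: t

lemma split1_ne_nil (cs : List Char) : split1 cs ≠ [] := by
  cases cs with
  | nil => simp [split1]
  | cons c cs =>
    simp only [split1]
    split_ifs with h
    · simp
    · cases hs : split1 cs <;> simp

-- splitOn.go computed with enough fuel is split1 (with the pending word prefixed)
lemma go_spec (fuel : Nat) : ∀ (l cur : List Char) (acc : List (List Char)),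
    l.length < fuel →
    PySem.Chars.splitOn.go [' '] fuel l cur.reverse acc =
      acc.reverse ++ (split1 l).modifyHead (cur ++ ·) := by
  induction fuel with
  | zero => intro l cur acc h; omega
  | succ fuel ih =>
    intro l cur acc h
    cases l with
    | nil =>
      simp [PySem.Chars.splitOn.go, split1]
    | cons c rest =>
      by_cases hc : c = ' '
      · subst hc
        have hstep : PySem.Chars.splitOn.go [' '] (fuel+1) (' ' :: rest) cur.reverse acc
            = PySem.Chars.splitOn.go [' '] fuel rest ([] : List Char).reverse (cur.reverse.reverse :: acc) := by
          simp [PySem.Chars.splitOn.go, List.isPrefixOf]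
        rw [hstep, ih rest [] _ (by simpa using Nat.lt_of_succ_lt_succ h)]
        cases hs : split1 rest with
        | nil => exact absurd hs (split1_ne_nil rest)
        | cons h' t' => simp [split1, hs]
      · have hstep : PySem.Chars.splitOn.go [' '] (fuel+1) (c :: rest) cur.reverse acc
            = PySem.Chars.splitOn.go [' '] fuel rest (cur ++ [c]).reverse acc := by
          simp [PySem.Chars.splitOn.go, List.isPrefixOf, beq_iff_eq, Ne.symm hc]
        rw [hstep, ih rest (cur ++ [c]) acc (by simpa using Nat.lt_of_succ_lt_succ h)]
        cases hs : split1 rest with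
        | nil => exact absurd hs (split1_ne_nil rest)
        | cons h' t' => simp [split1, hc, hs]

lemma modifyHead_id' (l : List (List Char)) : l.modifyHead (fun x => x) = l := by
  cases l <;> simp

lemma splitOn_eq_split1 (cs : List Char) : PySem.Chars.splitOn cs [' '] = split1 cs := by
  have := go_spec (cs.length + 1) cs [] [] (by omega)
  simpa [PySem.Chars.splitOn, modifyHead_id'] using this

-- the word transform A applies
def wrapW (w : List Char) : List Char :=
  if PySem.Chars.startswith w ['$'] then '{' :: (w.drop 1 ++ ['}']) else w

def dollar (w : List Char) : Bool := PySem.Chars.startswith w ['$']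

lemma guard_eq (w : List Char) :
    (!decide (w = []) && PySem.Chars.startswith w ['$']) = dollar w := by
  cases w with
  | nil => simp [dollar, PySem.Chars.startswith, List.isPrefixOf]
  | cons a as => simp [dollar]

-- A's loop over the word list, characterised
lemma foldA_spec (values : List (List Char)) : ∀ (ps : Bool) (acc : List (List Char)),
    values.foldl
      (fun (st : Bool × List (List Char)) word =>
        if (word ≠ []) && PySem.Chars.startswith word ['$'] then
          (true, st.2 ++ [['{'] ++ PySem.List.slice word (some 1) none ++ ['}']])
        else
          (st.1, st.2 ++ [word]))
      (ps, acc)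
    = (ps || values.any dollar, acc ++ values.map wrapW) := by
  induction values with
  | nil => intro ps acc; simp
  | cons w ws ih =>
    intro ps acc
    simp only [ne_eq, decide_not, guard_eq] at ih ⊢
    simp only [List.foldl_cons, List.any_cons, List.map_cons]
    by_cases hd : dollar w
    · rw [if_pos hd, ih]
      have hw : wrapW w = ['{'] ++ PySem.List.slice w (some 1) none ++ ['}'] := by
        have hd' : PySem.Chars.startswith w ['$'] = true := hd
        simp [wrapW, hd', PySem.List.slice_from (xs := w) (a := 1) (by norm_num)]
      simp [hd, hw, List.append_assoc]
    · rw [if_neg (by simp [hd]), ih]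
      have hw : wrapW w = w := by
        have hd' : PySem.Chars.startswith w ['$'] = false := by simpa using hd
        simp [wrapW, hd']
      simp [show dollar w = false by simpa using hd, hw, List.append_assoc]

-- reference results
def Rfound (cs : List Char) : Bool := (split1 cs).any dollar
def Rtxt (cs : List Char) : List Char := List.intercalate [' '] ((split1 cs).map wrapW)

lemma intercalate_cons_cons (sep x y : List Char) (xs : List (List Char)) :
    List.intercalate sep (x :: y :: xs) = x ++ sep ++ List.intercalate sep (y :: xs) := by
  simp [List.intercalate, List.intersperse]

-- split1 in terms of takeWhile/dropWhile
lemma split1_take (cs : List Char) :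
    split1 cs = cs.takeWhile (· ≠ ' ') ::
      (match cs.dropWhile (· ≠ ' ') with
        | [] => []
        | _ :: r => split1 r) := by
  induction cs with
  | nil => simp [split1]
  | cons c cs ih =>
    by_cases hc : c = ' '
    · subst hc; simp [split1, List.takeWhile, List.dropWhile]
    · simp only [split1, if_neg hc]
      rw [ih]
      simp [List.takeWhile, List.dropWhile, hc]

-- finalize of the DFA state: close a pending brace
def finB (st : Bool × Bool × Bool × List Char) : Bool × List Char :=
  (st.2.2.1, if st.2.1 then st.2.2.2 ++ ['}'] else st.2.2.2)

lemma foldB_invariant (cs : List Char) :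
    (∀ (found : Bool) (out : List Char),
      finB (cs.foldl stepB (true, false, found, out)) = (found || Rfound cs, out ++ Rtxt cs))
    ∧ (∀ (inParam found : Bool) (out : List Char),
      finB (cs.foldl stepB (false, inParam, found, out)) =
        (found || (match cs.dropWhile (· ≠ ' ') with | [] => false | _ :: r => Rfound r),
         out ++ cs.takeWhile (· ≠ ' ') ++ (if inParam then ['}'] else []) ++
           (match cs.dropWhile (· ≠ ' ') with | [] => [] | _ :: r => ' ' :: Rtxt r))) := by
  induction cs with
  | nil =>
    constructor
    · intro found out
      simp [finB, Rfound, Rtxt, split1, wrapW, dollar, PySem.Chars.startswith,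
        List.isPrefixOf, List.intercalate]
    · intro inParam found out
      cases inParam <;> simp [finB]
  | cons c cs ih =>
    obtain ⟨ihT, ihF⟩ := ih
    constructor
    · -- at word start (in_param is false there)
      intro found out
      by_cases hc : c = ' '
      · subst hc
        have hstep : stepB (true, false, found, out) ' ' = (true, false, found, out ++ [' ']) := by
          simp [stepB]
        simp only [List.foldl_cons, hstep]
        rw [ihT found (out ++ [' '])]
        have hsp : split1 (' ' :: cs) = [] :: split1 cs := by simp [split1]
        have hR : Rfound (' ' :: cs) = Rfound cs := by
          simp [Rfound, hsp, dollar, PySem.Chars.startswith, List.isPrefixOf]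
        have hT : Rtxt (' ' :: cs) = ' ' :: Rtxt cs := by
          unfold Rtxt
          rw [hsp]
          cases hs : split1 cs with
          | nil => exact absurd hs (split1_ne_nil cs)
          | cons h t =>
            rw [List.map_cons, List.map_cons, intercalate_cons_cons]
            simp [wrapW, PySem.Chars.startswith, List.isPrefixOf]
        rw [hR, hT]; simp
      · by_cases hd : c = '$'
        · subst hd
          have hstep : stepB (true, false, found, out) '$' = (false, true, true, out ++ ['{']) := by
            simp [stepB]
          simp only [List.foldl_cons, hstep]
          rw [ihF true true (out ++ ['{'])]
          have hsp := split1_take cs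
          have hRf : Rfound ('$' :: cs) = true := by
            unfold Rfound
            rw [show split1 ('$' :: cs) = ('$' :: cs.takeWhile (· ≠ ' ')) ::
                (match cs.dropWhile (· ≠ ' ') with | [] => [] | _ :: r => split1 r) by
              simp only [split1, if_neg (by decide : ¬ ('$' = ' '))]
              rw [split1_take cs]]
            simp [dollar, PySem.Chars.startswith, List.isPrefixOf]
          have hRt : Rtxt ('$' :: cs) =
              '{' :: (cs.takeWhile (· ≠ ' ') ++ ['}']) ++
                (match cs.dropWhile (· ≠ ' ') with | [] => [] | _ :: r => ' ' :: Rtxt r) := by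
            unfold Rtxt
            rw [show split1 ('$' :: cs) = ('$' :: cs.takeWhile (· ≠ ' ')) ::
                (match cs.dropWhile (· ≠ ' ') with | [] => [] | _ :: r => split1 r) by
              simp only [split1, if_neg (by decide : ¬ ('$' = ' '))]
              rw [split1_take cs]]
            cases hdw : cs.dropWhile (· ≠ ' ') with
            | nil =>
              simp [wrapW, PySem.Chars.startswith, List.isPrefixOf, List.intercalate]
            | cons d r =>
              cases hs : split1 r with
              | nil => exact absurd hs (split1_ne_nil r)
              | cons h t =>
                simp only [List.map_cons, hs]
                rw [intercalate_cons_cons]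
                simp [wrapW, PySem.Chars.startswith, List.isPrefixOf]
          rw [hRf, hRt]
          cases hdw : cs.dropWhile (· ≠ ' ') with
          | nil => simp [List.append_assoc]
          | cons d r => simp [List.append_assoc]
        · have hstep : stepB (true, false, found, out) c = (false, false, found, out ++ [c]) := by
            simp [stepB, hc, hd]
          simp only [List.foldl_cons, hstep]
          rw [ihF false found (out ++ [c])]
          have hsp : split1 (c :: cs) = (c :: cs.takeWhile (· ≠ ' ')) ::
              (match cs.dropWhile (· ≠ ' ') with | [] => [] | _ :: r => split1 r) := by
            simp only [split1, if_neg hc]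
            rw [split1_take cs]
          have hcd : ¬ '$' = c := fun h => hd h.symm
          have hR : Rfound (c :: cs) =
              (match cs.dropWhile (· ≠ ' ') with | [] => false | _ :: r => Rfound r) := by
            unfold Rfound
            rw [hsp]
            cases hdw : cs.dropWhile (· ≠ ' ') with
            | nil => simp [dollar, PySem.Chars.startswith, List.isPrefixOf, hcd]
            | cons d r => simp [dollar, PySem.Chars.startswith, List.isPrefixOf, hcd]
          have hT : Rtxt (c :: cs) = c :: cs.takeWhile (· ≠ ' ') ++
              (match cs.dropWhile (· ≠ ' ') with | [] => [] | _ :: r => ' ' :: Rtxt r) := by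
            unfold Rtxt
            rw [hsp]
            cases hdw : cs.dropWhile (· ≠ ' ') with
            | nil =>
              simp [wrapW, PySem.Chars.startswith, List.isPrefixOf, hcd, List.intercalate]
            | cons d r =>
              cases hs : split1 r with
              | nil => exact absurd hs (split1_ne_nil r)
              | cons h t =>
                simp only [List.map_cons, hs]
                rw [intercalate_cons_cons]
                simp [wrapW, PySem.Chars.startswith, List.isPrefixOf, hcd]
          rw [hR, hT]
          cases cs.dropWhile (· ≠ ' ') <;> simp [List.append_assoc]
    · -- inside a word
      intro inParam found out
      by_cases hc : c = ' '
      · subst hc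
        have hstep : stepB (false, inParam, found, out) ' '
            = (true, false, found, (if inParam then out ++ ['}'] else out) ++ [' ']) := by
          simp [stepB]
        simp only [List.foldl_cons, hstep]
        rw [ihT found ((if inParam then out ++ ['}'] else out) ++ [' '])]
        simp only [List.takeWhile, List.dropWhile, decide_not]
        cases inParam <;> simp [List.append_assoc]
      · have hstep : stepB (false, inParam, found, out) c = (false, inParam, found, out ++ [c]) := by
          simp [stepB, hc]
        simp only [List.foldl_cons, hstep]
        rw [ihF inParam found (out ++ [c])]
        have ht : (c :: cs).takeWhile (· ≠ ' ') = c :: cs.takeWhile (· ≠ ' ') := by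
          simp [List.takeWhile, hc]
        have hdw : (c :: cs).dropWhile (· ≠ ' ') = cs.dropWhile (· ≠ ' ') := by
          simp [List.dropWhile, hc]
        rw [ht, hdw]
        simp [List.append_assoc]

-- ===== VERDICT (by name: the statement is the Claim_ definition above) =====
theorem alt_attribute_spec : Claim_equal_alt_attribute := by
  intro alt attr_name _
  unfold Spec_alt_attribute alt_attribute alt_attribute_alt
  dsimp only
  rw [splitOn_eq_split1, foldA_spec]
  have hfin := (foldB_invariant alt.toList).1 false []
  simp only [Bool.false_or, List.nil_append] at hfin
  have h1 : (alt.toList.foldl stepB (true, false, false, [])).2.2.1 = Rfound alt.toList :=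
    congrArg Prod.fst hfin
  have h2 : (if (alt.toList.foldl stepB (true, false, false, [])).2.1 then
        (alt.toList.foldl stepB (true, false, false, [])).2.2.2 ++ ['}']
      else (alt.toList.foldl stepB (true, false, false, [])).2.2.2) = Rtxt alt.toList :=
    congrArg Prod.snd hfin
  simp only [h1, h2, Bool.false_or, List.nil_append, PySem.Chars.join]
  unfold Rfound Rtxt param_attr str_attr
  cases hF : (split1 alt.toList).any dollar <;> simp
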